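-- pv_equiv track=rewrite | github.com/bssrdf/pyleet | MinimumCosttoSplitanArray.py | minCost2
-- ===== SOURCE A (Python) =====
-- from typing import List
-- from math import inf
-- from collections import Counter
--
-- def minCost2(nums: List[int], k: int) -> int:
--     n = len(nums)
--     dp = [inf]*(n+1)
--     dp[0] = 0
--     imp = [[0]*(n+1) for _ in range(n+1)]
--     for l in range(1, n+1):
--         uni, mul = set(), Counter()
--         for i in range(n):
--             if nums[i] in uni:
--                 uni.remove(nums[i])
--                 mul[nums[i]] = 2
--             elif nums[i] not in mul:
--                 uni.add(nums[i])
--             else: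
--                 mul[nums[i]] += 1
--             if i >= l:
--                 j = i-l
--                 if nums[j] in uni:
--                     uni.remove(nums[j])
--                 else:
--                     mul[nums[j]] -= 1
--                     if mul[nums[j]] == 1:
--                         uni.add(nums[j])
--                         mul.pop(nums[j])
--             if i >= l-1:
--                 imp[i-l+1][i+1] = k + l - len(uni)
--     for i in range(1,n+1):
--         for j in range(i):
--             dp[i] = min(dp[i], dp[j]+imp[j][i])
--     return dp[n]
-- ===== SOURCE B (Python) =====
-- from collections import Counter
--
-- def minCost2(nums, k):
--     # Direct O(n^2) DP without the precomputed importance table: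
--     # extend the window leftwards while maintaining a count of values
--     # occurring exactly once ('once').
--     n = len(nums)
--     dp = [0]
--     for i in range(1, n + 1):
--         cnt = Counter()
--         once = 0
--         best = None
--         for j in range(i - 1, -1, -1):
--             x = nums[j]
--             cnt[x] += 1
--             if cnt[x] == 1:
--                 once += 1
--             elif cnt[x] == 2:
--                 once -= 1
--             cost = dp[j] + k + (i - j) - once
--             if best is None or cost < best:
--                 best = cost
--         dp.append(best)
--     return dp[n]
-- ===== Notes on version B (the rewrite author's own statement) =====
-- stated objective: simpler
-- what changed: B drops A's (n+1)x(n+1) precomputed importance table and its separate per-length sliding-window passes and third DP pass: it runs the DP in one nested loop, extending each window leftwards while maintaining a Counter and an integer 'once' count of values occurring exactly once.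
import Mathlib
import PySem

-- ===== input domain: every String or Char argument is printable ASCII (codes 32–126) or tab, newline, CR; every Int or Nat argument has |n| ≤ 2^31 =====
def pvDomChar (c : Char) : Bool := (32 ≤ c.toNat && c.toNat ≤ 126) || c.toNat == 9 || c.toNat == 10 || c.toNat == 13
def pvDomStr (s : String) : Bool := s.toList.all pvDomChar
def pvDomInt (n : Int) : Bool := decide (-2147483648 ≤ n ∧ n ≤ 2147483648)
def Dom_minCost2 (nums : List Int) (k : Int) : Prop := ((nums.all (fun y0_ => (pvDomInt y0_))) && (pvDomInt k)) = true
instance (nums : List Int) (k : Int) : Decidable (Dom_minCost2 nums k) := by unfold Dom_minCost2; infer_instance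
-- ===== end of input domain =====

-- B drops A's precomputed importance table and third pass: it runs the DP directly,
-- growing each window leftwards while maintaining an exact count of values that occur
-- once (objective: simpler, one structure instead of three).

-- ===== PORT A =====
-- math.inf is modelled as `none` in an `Option Int` (it only ever arises from dp's
-- initial value); pvOMin/pvOAdd are Python's min/+ lifted to that model.
def pvOMin (a b : Option Int) : Option Int :=
  match a, b with
  | none, b => b
  | a, none => a
  | some x, some y => some (min x y)

def pvOAdd (a : Option Int) (x : Int) : Option Int :=
  a.map (· + x)

-- body of A's inner `for i in range(n)` loop (state: uni, mul, imp)
def stepAInner (nums : List Int) (k l : Int)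
    (st : PySem.Set Int × PySem.Dict Int Int × List (List Int)) (i : Int) :
    PySem.Set Int × PySem.Dict Int Int × List (List Int) :=
  let uni := st.1
  let mul := st.2.1
  let imp := st.2.2
  let x := PySem.List.pyGetD nums i 0
  let p1 :=
    if PySem.Set.contains uni x then
      -- uni.remove(x) under the membership guard = discard (exact here)
      (PySem.Set.discard uni x, mul.insert x 2)
    else if !(mul.contains x) then
      (PySem.Set.add uni x, mul)
    else
      -- Counter: mul[x] += 1
      (uni, mul.insert x (mul.getD x 0 + 1))
  let uni1 := p1.1
  let mul1 := p1.2
  let p2 :=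
    if l ≤ i then
      let y := PySem.List.pyGetD nums (i - l) 0
      if PySem.Set.contains uni1 y then
        (PySem.Set.discard uni1 y, mul1)
      else
        -- Counter: mul[y] -= 1
        let mul2 := mul1.insert y (mul1.getD y 0 - 1)
        if mul2.getD y 0 = 1 then
          -- mul.pop(y) under the guard = erase (exact here)
          (PySem.Set.add uni1 y, mul2.erase y)
        else (uni1, mul2)
    else (uni1, mul1)
  let uni2 := p2.1
  let mul2 := p2.2
  let imp2 :=
    if l - 1 ≤ i then
      PySem.List.pySetD imp (i - l + 1)
        (PySem.List.pySetD (PySem.List.pyGetD imp (i - l + 1) []) (i + 1)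
          (k + l - (PySem.Set.len uni2 : Int)))
    else imp
  (uni2, mul2, imp2)

def minCost2 (nums : List Int) (k : Int) : Int :=
  let n : Int := (nums.length : Int)
  let dp0 : List (Option Int) := List.replicate (nums.length + 1) none
  let dp1 := PySem.List.pySetD dp0 0 (some 0)
  let imp0 : List (List Int) :=
    (List.range (nums.length + 1)).map (fun _ => List.replicate (nums.length + 1) (0 : Int))
  let imp := (PySem.List.pyRange 1 (n + 1) 1).foldl
    (fun imp l =>
      ((PySem.List.pyRange 0 n 1).foldl (stepAInner nums k l)
        (PySem.Set.empty, PySem.Dict.empty, imp)).2.2)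
    imp0
  let dp := (PySem.List.pyRange 1 (n + 1) 1).foldl
    (fun dp i =>
      (PySem.List.pyRange 0 i 1).foldl
        (fun dp j =>
          PySem.List.pySetD dp i
            (pvOMin (PySem.List.pyGetD dp i none)
              (pvOAdd (PySem.List.pyGetD dp j none)
                (PySem.List.pyGetD (PySem.List.pyGetD imp j []) i 0))))
        dp)
    dp1
  -- dp[n] is always finite (dp[0] = 0 and every dp[i] gets a finite candidate); the 0 default is unreachable
  (PySem.List.pyGetD dp n none).getD 0

-- ===== PORT B =====
-- body of B's inner `for j in range(i-1, -1, -1)` loop (state: cnt, once, best)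
def stepBInner (nums : List Int) (k i : Int) (dp : List Int)
    (st : PySem.Dict Int Int × Int × Option Int) (j : Int) :
    PySem.Dict Int Int × Int × Option Int :=
  let cnt := st.1
  let once := st.2.1
  let best := st.2.2
  let x := PySem.List.pyGetD nums j 0
  let cnt1 := cnt.modify x 0 (· + 1)            -- Counter: cnt[x] += 1
  let once1 :=
    if cnt1.getD x 0 = 1 then once + 1
    else if cnt1.getD x 0 = 2 then once - 1
    else once
  let cost := PySem.List.pyGetD dp j 0 + k + (i - j) - once1
  let best1 :=
    match best with
    | none => some cost
    | some b => if cost < b then some cost else some b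
  (cnt1, once1, best1)

def minCost2_alt (nums : List Int) (k : Int) : Int :=
  let n : Int := (nums.length : Int)
  let dp := (PySem.List.pyRange 1 (n + 1) 1).foldl
    (fun dp i =>
      let best := ((PySem.List.pyRange (i - 1) (-1) (-1)).foldl
        (stepBInner nums k i dp) (PySem.Dict.empty, 0, none)).2.2
      -- best is never None when it is appended: the inner loop runs i ≥ 1 times
      dp ++ [best.getD 0])
    [0]
  PySem.List.pyGetD dp n 0

-- ===== PRECONDITION & SPEC =====
def Spec_minCost2 (nums : List Int) (k : Int) (out : Int) : Prop := out = minCost2_alt nums k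
instance (nums : List Int) (k : Int) (out : Int) : Decidable (Spec_minCost2 nums k out) := by unfold Spec_minCost2; infer_instance

-- ===== CLAIM (what is proved, stated in full; the proofs are below) =====
def Claim_equal_minCost2 : Prop := ∀ (nums : List Int) (k : Int), Dom_minCost2 nums k → Spec_minCost2 nums k (minCost2 nums k)

-- ===== LEMMAS AND PROOFS =====

-- `pvWin nums a b` is the window nums[a:b] (natural indices)
def pvWin (nums : List Int) (a b : ℕ) : List Int := (nums.drop a).take (b - a)

-- number of values occurring exactly once in w
def pvOnce (w : List Int) : Int := ((w.toFinset.filter (fun v => w.count v = 1)).card : Int)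

-- importance of the chunk nums[j:i]
def pvCost (nums : List Int) (k : Int) (j i : ℕ) : Int :=
  k + ((i : Int) - (j : Int)) - pvOnce (pvWin nums j i)

-- candidate value at split point j (d = dp prefix list)
def pvC (nums : List Int) (k : Int) (d : List Int) (i j : ℕ) : Int :=
  d.getD j 0 + pvCost nums k j i

-- minimum of c over [a, b) (right recursion; junk for b ≤ a)
def pvMM (c : ℕ → Int) (a : ℕ) : ℕ → Int
  | 0 => c a
  | b + 1 => if a + 1 ≤ b then min (pvMM c a b) (c b) else c a

-- minimum of c over [j0, i) (left recursion, B's accumulation order)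
def pvBM (c : ℕ → Int) (i j0 : ℕ) : Int :=
  if j0 + 1 < i then min (pvBM c i (j0 + 1)) (c j0) else c j0
termination_by i - j0

-- minimum of c over [0, t) as accumulated by A's dp inner loop (none = inf)
def pvAM (c : ℕ → Int) : ℕ → Option Int
  | 0 => none
  | j + 1 => pvOMin (pvAM c j) (some (c j))

-- the common DP table: pvDpl nums k m = [dp 0, …, dp m]
def pvDpl (nums : List Int) (k : Int) : ℕ → List Int
  | 0 => [0]
  | i + 1 => pvDpl nums k i ++ [pvBM (pvC nums k (pvDpl nums k i) (i + 1)) (i + 1) 0]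

-- entry imp[a][b] of the importance table
def pvE (imp : List (List Int)) (a b : ℕ) : Int := (imp.getD a []).getD b 0

-- invariant of B's inner loop, after extending the window down to j0
def pvInvB (nums : List Int) (k : Int) (d : List Int) (i j0 : ℕ)
    (st : PySem.Dict Int Int × Int × Option Int) : Prop :=
  (∀ v, st.1.getD v 0 = ((pvWin nums j0 i).count v : Int))
  ∧ st.2.1 = pvOnce (pvWin nums j0 i)
  ∧ st.2.2 = (if j0 < i then some (pvBM (pvC nums k d i) i j0) else none)

-- invariant of A's window pass for length l, after processing indices [0, i)
def pvInvA (nums : List Int) (k : Int) (l : ℕ) (imp0 : List (List Int)) (i : ℕ)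
    (st : PySem.Set Int × PySem.Dict Int Int × List (List Int)) : Prop :=
  st.1.Nodup
  ∧ (∀ v, v ∈ st.1 ↔ (pvWin nums (i - l) i).count v = 1)
  ∧ (∀ v, st.2.1.get? v =
      if 2 ≤ (pvWin nums (i - l) i).count v then some (((pvWin nums (i - l) i).count v : Int)) else none)
  ∧ st.2.2.length = nums.length + 1
  ∧ (∀ r ∈ st.2.2, r.length = nums.length + 1)
  ∧ (∀ a b : ℕ, a ≤ nums.length → b ≤ nums.length →
      pvE st.2.2 a b = if b = a + l ∧ b ≤ i then pvCost nums k a b else pvE imp0 a b)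

-- ---- window decomposition ----

lemma pvWin_self (nums : List Int) (a : ℕ) : pvWin nums a a = [] := by
  simp [pvWin]

lemma pvWin_zero (nums : List Int) (a : ℕ) : pvWin nums a 0 = [] := by
  simp [pvWin]

lemma pvWin_succ_right (nums : List Int) {a b : ℕ} (hab : a ≤ b) (hb : b < nums.length) :
    pvWin nums a (b + 1) = pvWin nums a b ++ [nums[b]] := by
  unfold pvWin
  rw [show b + 1 - a = (b - a) + 1 by omega, List.take_add_one]
  congr 1
  rw [List.getElem?_drop]
  simp [show a + (b - a) = b by omega]

lemma pvWin_cons (nums : List Int) {a b : ℕ} (hab : a < b) (hb : b ≤ nums.length) :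
    pvWin nums a b = nums[a]'(by omega) :: pvWin nums (a + 1) b := by
  unfold pvWin
  rw [List.drop_eq_getElem_cons (by omega), show b - a = (b - (a+1)) + 1 by omega,
    List.take_succ_cons]

-- ---- pvOnce ----

lemma pvOnce_nil : pvOnce [] = 0 := by simp [pvOnce]

lemma pvOnce_cons (x : Int) (w : List Int) :
    pvOnce (x :: w) =
      pvOnce w + (if w.count x = 0 then 1 else if w.count x = 1 then -1 else 0) := by
  unfold pvOnce
  have hT : (x :: w).toFinset = insert x w.toFinset := by simp
  have hcnt : ∀ v : Int, (x :: w).count v = w.count v + (if v = x then 1 else 0) := by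
    intro v; by_cases hv : v = x <;> simp [List.count_cons, hv] <;> omega
  by_cases hx0 : w.count x = 0
  · have hxw : x ∉ w.toFinset := by simp [List.count_eq_zero.mp hx0]
    have hset : (x :: w).toFinset.filter (fun v => (x :: w).count v = 1)
         = insert x (w.toFinset.filter (fun v => w.count v = 1)) := by
      ext v
      by_cases hv : v = x
      · subst hv; simp [hT, Finset.mem_filter, hcnt, hx0]
      · simp [hT, Finset.mem_filter, hcnt, hv]
    rw [hset, Finset.card_insert_of_notMem (by simp [Finset.mem_filter, hxw]), hx0]
    push_cast; ring
  · by_cases hx1 : w.count x = 1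
    · have hxw : x ∈ w.toFinset := by
        rw [List.mem_toFinset]; exact List.count_pos_iff.mp (by omega)
      have hset : (x :: w).toFinset.filter (fun v => (x :: w).count v = 1)
           = (w.toFinset.filter (fun v => w.count v = 1)).erase x := by
        ext v
        by_cases hv : v = x
        · subst hv; simp [hT, Finset.mem_filter, Finset.mem_erase, hcnt, hx1]
        · simp [hT, Finset.mem_filter, Finset.mem_erase, hcnt, hv]
      rw [hset, Finset.card_erase_of_mem (by simp [Finset.mem_filter, hxw, hx1])]
      have hpos : 0 < (w.toFinset.filter (fun v => w.count v = 1)).card :=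
        Finset.card_pos.mpr ⟨x, by simp [Finset.mem_filter, hxw, hx1]⟩
      rw [hx1]
      push_cast [Nat.cast_sub (by omega : 1 ≤ (w.toFinset.filter (fun v => w.count v = 1)).card)]
      omega
    · have hset : (x :: w).toFinset.filter (fun v => (x :: w).count v = 1)
           = w.toFinset.filter (fun v => w.count v = 1) := by
        ext v
        by_cases hv : v = x
        · subst hv
          simp only [hT, Finset.mem_filter, Finset.mem_insert, List.mem_toFinset, hcnt]
          constructor
          · rintro ⟨-, hc⟩; omega
          · rintro ⟨-, hc⟩; omega
        · simp [hT, Finset.mem_filter, hcnt, hv]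
      rw [hset]
      simp [hx0, hx1]

lemma pvOnce_eq_len {s : List Int} {w : List Int} (hnd : s.Nodup)
    (hmem : ∀ v, v ∈ s ↔ w.count v = 1) : (s.length : Int) = pvOnce w := by
  unfold pvOnce
  rw [← List.toFinset_card_of_nodup hnd]
  congr 2
  ext v
  simp only [Finset.mem_filter, List.mem_toFinset, hmem]
  constructor
  · intro h; exact ⟨List.count_pos_iff.mp (by omega), h⟩
  · exact fun ⟨_, h⟩ => h

-- ---- min-recursion bookkeeping ----

lemma pvMM_split (c : ℕ → Int) : ∀ {b a m : ℕ}, a < m → m < b →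
    pvMM c a b = min (pvMM c a m) (pvMM c m b) := by
  intro b
  induction b with
  | zero => omega
  | succ b ih =>
    intro a m h1 h2
    rcases Nat.lt_or_ge m b with hmb | hmb
    · rw [show pvMM c a (b+1) = if a + 1 ≤ b then min (pvMM c a b) (c b) else c a from rfl,
        if_pos (by omega), ih h1 hmb,
        show pvMM c m (b+1) = if m + 1 ≤ b then min (pvMM c m b) (c b) else c m from rfl,
        if_pos (by omega), min_assoc]
    · have hm : m = b := by omega
      subst hm
      rw [show pvMM c a (m+1) = if a + 1 ≤ m then min (pvMM c a m) (c m) else c a from rfl,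
        if_pos (by omega),
        show pvMM c m (m+1) = if m + 1 ≤ m then min (pvMM c m m) (c m) else c m from rfl,
        if_neg (by omega)]

lemma pvMM_single (c : ℕ → Int) (a : ℕ) : pvMM c a (a + 1) = c a := by
  rw [show pvMM c a (a+1) = if a + 1 ≤ a then min (pvMM c a a) (c a) else c a from rfl,
    if_neg (by omega)]

lemma pvBM_eq_MM (c : ℕ → Int) : ∀ (d j0 i : ℕ), i = j0 + d + 1 → pvBM c i j0 = pvMM c j0 i := by
  intro d
  induction d with
  | zero =>
    intro j0 i h; subst h
    rw [pvBM, if_neg (by omega), pvMM_single]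
  | succ d ih =>
    intro j0 i h
    rw [pvBM, if_pos (by omega), ih (j0+1) i (by omega),
      pvMM_split c (show j0 < j0 + 1 by omega) (show j0 + 1 < i by omega),
      pvMM_single, min_comm]

lemma pvAM_eq_MM (c : ℕ → Int) : ∀ j : ℕ, pvAM c (j + 1) = some (pvMM c 0 (j + 1)) := by
  intro j
  induction j with
  | zero => simp [pvAM, pvMM, pvOMin]
  | succ j ih =>
    rw [show pvAM c (j+2) = pvOMin (pvAM c (j+1)) (some (c (j+1))) from rfl, ih,
      show pvMM c 0 (j+2) = if 0 + 1 ≤ j + 1 then min (pvMM c 0 (j+1)) (c (j+1)) else c 0 from rfl,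
      if_pos (by omega)]
    rfl

lemma pvFind?_filter_ne (t : List (Int × Int)) (y v : Int) :
    List.find? (fun p => p.1 == v) (t.filter (fun p => !p.1 == y))
      = if v = y then none else t.find? (fun p => p.1 == v) := by
  induction t with
  | nil => simp
  | cons p t ih =>
    rw [List.filter_cons]
    by_cases hpy : p.1 = y
    · rw [if_neg (by simp [hpy]), ih]
      by_cases hv : v = y
      · simp [hv]
      · rw [if_neg hv, if_neg hv, List.find?_cons_of_neg (by simp [hpy]; omega)]
    · rw [if_pos (by simp [hpy])]
      by_cases hpv : p.1 = v
      · rw [List.find?_cons_of_pos (by simp [hpv]), List.find?_cons_of_pos (by simp [hpv]),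
          if_neg (fun h => hpy (by rw [hpv, h]))]
      · rw [List.find?_cons_of_neg (by simp [hpv]), List.find?_cons_of_neg (by simp [hpv]), ih]

lemma pvDict_get?_erase (d : PySem.Dict Int Int) (y v : Int) :
    (d.erase y).get? v = if v = y then none else d.get? v := by
  obtain ⟨items⟩ := d
  simp only [PySem.Dict.erase, PySem.Dict.get?, pvFind?_filter_ne]
  by_cases hv : v = y <;> simp [hv]

-- ---- B side ----

lemma pvStepB_inv (nums : List Int) (k : Int) (d : List Int) (i t : ℕ)
    (ht : t < i) (hi : i ≤ nums.length) (st : PySem.Dict Int Int × Int × Option Int)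
    (h : pvInvB nums k d i (t + 1) st) :
    pvInvB nums k d i t (stepBInner nums k (i : Int) d st (t : Int)) := by
  obtain ⟨hc, ho, hb⟩ := h
  have hx : PySem.List.pyGetD nums (t : Int) 0 = nums[t]'(by omega) := by
    rw [PySem.List.pyGetD_natCast, List.getD_eq_getElem?_getD, List.getElem?_eq_getElem (by omega)]
    rfl
  have hw : pvWin nums t i = nums[t]'(by omega) :: pvWin nums (t + 1) i :=
    pvWin_cons nums (by omega) hi
  set x := nums[t]'(by omega) with hxdef
  set w := pvWin nums (t + 1) i with hwdef
  unfold stepBInner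
  rw [hx]
  simp only [PySem.Dict.getD_modify, eq_self_iff_true, if_true]
  have hcx : st.1.getD x 0 = (w.count x : Int) := hc x
  have hc1 : ∀ v : Int, (if v = x then st.1.getD x 0 + 1 else st.1.getD v 0)
      = ((pvWin nums t i).count v : Int) := by
    intro v
    rw [hw]
    by_cases hv : v = x
    · subst hv; rw [if_pos rfl, hcx, List.count_cons_self]; push_cast; ring
    · rw [if_neg hv, hc v, List.count_cons_of_ne (fun hh => hv (by simp [hh]))]
  have honce : (if st.1.getD x 0 + 1 = 1 then st.2.1 + 1
        else if st.1.getD x 0 + 1 = 2 then st.2.1 - 1 else st.2.1)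
      = pvOnce (pvWin nums t i) := by
    rw [hw, pvOnce_cons, ho, hcx]
    by_cases h0 : w.count x = 0
    · rw [if_pos (by rw [h0]; ring), if_pos h0]
    · rw [if_neg (by push_cast; omega), if_neg h0]
      by_cases h1 : w.count x = 1
      · rw [if_pos (by rw [h1]; ring), if_pos h1]; ring
      · rw [if_neg (by push_cast; omega), if_neg h1]; ring
  have hdj : PySem.List.pyGetD d (t : Int) 0 = d.getD t 0 := PySem.List.pyGetD_natCast d t 0
  have hcost : PySem.List.pyGetD d (t : Int) 0 + k + ((i : Int) - (t : Int)) -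
        (if st.1.getD x 0 + 1 = 1 then st.2.1 + 1
          else if st.1.getD x 0 + 1 = 2 then st.2.1 - 1 else st.2.1)
      = pvC nums k d i t := by
    rw [hdj, honce, pvC, pvCost]; ring
  refine ⟨?_, ?_, ?_⟩
  · intro v
    simp only [PySem.Dict.getD_modify]
    exact hc1 v
  · exact honce
  · rw [hb]
    by_cases h2 : t + 1 < i
    · rw [if_pos h2, if_pos ht]
      dsimp only
      rw [hcost]
      conv_rhs => rw [pvBM, if_pos h2]
      by_cases hlt : pvC nums k d i t < pvBM (pvC nums k d i) i (t + 1)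
      · rw [if_pos hlt, min_eq_right (le_of_lt hlt)]
      · rw [if_neg hlt, min_eq_left (not_lt.mp hlt)]
    · rw [if_neg h2, if_pos ht]
      dsimp only
      rw [hcost]
      conv_rhs => rw [pvBM, if_neg h2]

lemma pvLoopB (nums : List Int) (k : Int) (d : List Int) (i : ℕ) (hi : i ≤ nums.length) :
    ∀ (j0 : ℕ), j0 ≤ i → ∀ st, pvInvB nums k d i j0 st →
      pvInvB nums k d i 0
        ((PySem.List.pyRange ((j0 : Int) - 1) (-1) (-1)).foldl (stepBInner nums k (i : Int) d) st) := by
  intro j0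
  induction j0 with
  | zero =>
    intro _ st h
    rw [show ((0 : ℕ) : Int) - 1 = -1 by norm_num,
      PySem.List.pyRange_neg_one_eq_nil (by norm_num)]
    exact h
  | succ t ih =>
    intro hj st h
    rw [show ((t + 1 : ℕ) : Int) - 1 = (t : Int) by push_cast; ring,
      PySem.List.pyRange_neg_one_cons (by omega),
      List.foldl_cons]
    have h' := pvStepB_inv nums k d i t (by omega) hi st h
    have := ih (by omega) _ h'
    rwa [show ((t : ℕ) : Int) - 1 = (t : Int) - 1 by norm_num] at this

lemma pvDpl_length (nums : List Int) (k : Int) (m : ℕ) : (pvDpl nums k m).length = m + 1 := by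
  induction m with
  | zero => simp [pvDpl]
  | succ m ih => simp [pvDpl, ih]

lemma pvDpl_getD_stable (nums : List Int) (k : Int) {j m m' : ℕ} (hj : j ≤ m) (h : m ≤ m') :
    (pvDpl nums k m').getD j 0 = (pvDpl nums k m).getD j 0 := by
  induction m', h using Nat.le_induction with
  | base => rfl
  | succ m' hm ih =>
    rw [show pvDpl nums k (m' + 1) = pvDpl nums k m' ++ [_] from rfl,
      List.getD_append _ _ _ _ (by rw [pvDpl_length]; omega), ih]

lemma pvB_outer (nums : List Int) (k : Int) :
    ∀ m : ℕ, m ≤ nums.length →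
      (PySem.List.pyRange 1 ((m : Int) + 1) 1).foldl
        (fun dp i =>
          dp ++ [(((PySem.List.pyRange (i - 1) (-1) (-1)).foldl
            (stepBInner nums k i dp) (PySem.Dict.empty, 0, none)).2.2).getD 0])
        [0] = pvDpl nums k m := by
  intro m
  induction m with
  | zero =>
    intro _
    rw [show ((0 : ℕ) : Int) + 1 = 1 by norm_num, PySem.List.pyRange_one_eq_nil (by norm_num)]
    rfl
  | succ m ih =>
    intro hm1
    rw [show ((m + 1 : ℕ) : Int) + 1 = ((m : Int) + 1) + 1 by push_cast; ring,
      PySem.List.pyRange_one_succ_right (by omega), List.foldl_append,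
      ih (by omega), List.foldl_cons, List.foldl_nil]
    have hinit : pvInvB nums k (pvDpl nums k m) (m + 1) (m + 1)
        (PySem.Dict.empty, 0, none) := by
      refine ⟨?_, ?_, ?_⟩
      · intro v; rw [pvWin_self]; simp [PySem.Dict.getD_eq_get?_getD, PySem.Dict.get?_empty]
      · rw [pvWin_self, pvOnce_nil]
      · rw [if_neg (by omega)]
    have hres := pvLoopB nums k (pvDpl nums k m) (m + 1) (by omega) (m + 1) le_rfl
      (PySem.Dict.empty, 0, none) hinit
    obtain ⟨-, -, hbest⟩ := hres
    rw [show (m : Int) + 1 - 1 = ((m + 1 : ℕ) : Int) - 1 by push_cast; ring]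
    rw [show ((m : Int) + 1) = ((m + 1 : ℕ) : Int) by push_cast; ring] 
    rw [hbest, if_pos (by omega)]
    rfl

lemma pvB_value (nums : List Int) (k : Int) :
    minCost2_alt nums k = (pvDpl nums k nums.length).getD nums.length 0 := by
  unfold minCost2_alt
  dsimp only
  rw [pvB_outer nums k nums.length le_rfl, PySem.List.pyGetD_natCast]

-- ---- A side ----

lemma pvCount_append (w : List Int) (x v : Int) :
    (w ++ [x]).count v = w.count v + if v = x then 1 else 0 := by
  by_cases hv : v = x <;> simp [List.count_append, List.count_cons, hv] <;> omega

lemma pvCount_cons (w : List Int) (x v : Int) :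
    (x :: w).count v = w.count v + if v = x then 1 else 0 := by
  by_cases hv : v = x <;> simp [List.count_cons, hv] <;> omega

lemma pvAddElem (uni : PySem.Set Int) (mul : PySem.Dict Int Int) (x : Int) (w : List Int)
    (hnd : uni.Nodup) (hu : ∀ v, v ∈ uni ↔ w.count v = 1)
    (hm : ∀ v, mul.get? v = if 2 ≤ w.count v then some ((w.count v : Int)) else none) :
    (if PySem.Set.contains uni x then (PySem.Set.discard uni x, mul.insert x 2)
     else if !(mul.contains x) then (PySem.Set.add uni x, mul)
     else (uni, mul.insert x (mul.getD x 0 + 1))).1.Nodup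
    ∧ (∀ v, v ∈ (if PySem.Set.contains uni x then (PySem.Set.discard uni x, mul.insert x 2)
     else if !(mul.contains x) then (PySem.Set.add uni x, mul)
     else (uni, mul.insert x (mul.getD x 0 + 1))).1 ↔ (w ++ [x]).count v = 1)
    ∧ (∀ v, (if PySem.Set.contains uni x then (PySem.Set.discard uni x, mul.insert x 2)
     else if !(mul.contains x) then (PySem.Set.add uni x, mul)
     else (uni, mul.insert x (mul.getD x 0 + 1))).2.get? v
        = if 2 ≤ (w ++ [x]).count v then some (((w ++ [x]).count v : Int)) else none) := by
  by_cases h1 : w.count x = 1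
  · rw [if_pos (PySem.Set.contains_iff uni x |>.mpr ((hu x).mpr h1))]
    refine ⟨PySem.Set.nodup_discard uni x hnd, ?_, ?_⟩
    · intro v
      rw [PySem.Set.mem_discard, pvCount_append]
      by_cases hv : v = x
      · subst hv; rw [hu v]; simp [h1]
      · simp [hu v, hv]
    · intro v
      rw [PySem.Dict.get?_insert, pvCount_append]
      by_cases hv : v = x
      · subst hv; simp [h1]
      · rw [if_neg hv, if_neg hv, hm v]; simp [hv]
  · have hcu : PySem.Set.contains uni x = false := by
      rw [← Bool.not_eq_true, PySem.Set.contains_iff, hu x]; exact h1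
    rw [if_neg (by rw [hcu]; exact Bool.false_ne_true)]
    by_cases h0 : w.count x = 0
    · have hcm : mul.contains x = false := by
        rw [PySem.Dict.contains_eq_isSome_get?, hm x, if_neg (by omega)]; rfl
      rw [if_pos (by rw [hcm]; rfl)]
      refine ⟨PySem.Set.nodup_add uni x hnd, ?_, ?_⟩
      · intro v
        rw [PySem.Set.mem_add, pvCount_append]
        by_cases hv : v = x
        · subst hv; rw [hu v]; simp [h0]
        · simp [hu v, hv]
      · intro v
        rw [hm v, pvCount_append]
        by_cases hv : v = x
        · subst hv; simp [h0]
        · simp [hv]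
    · have h2 : 2 ≤ w.count x := by omega
      have hcm : mul.contains x = true := by
        rw [PySem.Dict.contains_eq_isSome_get?, hm x, if_pos h2]; rfl
      rw [if_neg (by rw [hcm]; exact fun h => by simpa using h)]
      refine ⟨hnd, ?_, ?_⟩
      · intro v
        rw [hu v, pvCount_append]
        by_cases hv : v = x
        · subst hv; constructor
          · intro h; omega
          · intro h; omega
        · simp [hv]
      · intro v
        rw [PySem.Dict.get?_insert, pvCount_append]
        by_cases hv : v = x
        · subst hv
          rw [if_pos rfl, if_pos (by omega), PySem.Dict.getD_eq_get?_getD, hm v, if_pos h2]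
          simp
        · rw [if_neg hv, if_neg hv, hm v]; simp

lemma pvDropHead (uni : PySem.Set Int) (mul : PySem.Dict Int Int) (y : Int) (w' : List Int)
    (hnd : uni.Nodup) (hu : ∀ v, v ∈ uni ↔ (y :: w').count v = 1)
    (hm : ∀ v, mul.get? v =
      if 2 ≤ (y :: w').count v then some (((y :: w').count v : Int)) else none) :
    (if PySem.Set.contains uni y then (PySem.Set.discard uni y, mul)
     else
       let mul2 := mul.insert y (mul.getD y 0 - 1)
       if mul2.getD y 0 = 1 then (PySem.Set.add uni y, mul2.erase y)
       else (uni, mul2)).1.Nodup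
    ∧ (∀ v, v ∈ (if PySem.Set.contains uni y then (PySem.Set.discard uni y, mul)
     else
       let mul2 := mul.insert y (mul.getD y 0 - 1)
       if mul2.getD y 0 = 1 then (PySem.Set.add uni y, mul2.erase y)
       else (uni, mul2)).1 ↔ w'.count v = 1)
    ∧ (∀ v, (if PySem.Set.contains uni y then (PySem.Set.discard uni y, mul)
     else
       let mul2 := mul.insert y (mul.getD y 0 - 1)
       if mul2.getD y 0 = 1 then (PySem.Set.add uni y, mul2.erase y)
       else (uni, mul2)).2.get? v
        = if 2 ≤ w'.count v then some ((w'.count v : Int)) else none) := by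
  dsimp only
  have hcy : (y :: w').count y = w'.count y + 1 := by rw [pvCount_cons]; simp
  by_cases hy0 : w'.count y = 0
  · rw [if_pos (PySem.Set.contains_iff uni y |>.mpr ((hu y).mpr (by omega)))]
    refine ⟨PySem.Set.nodup_discard uni y hnd, ?_, ?_⟩
    · intro v
      rw [PySem.Set.mem_discard, hu v, pvCount_cons]
      by_cases hv : v = y
      · subst hv; simp [hy0]
      · simp [hv]
    · intro v
      rw [hm v, pvCount_cons]
      by_cases hv : v = y
      · subst hv; simp [hy0]
      · simp [hv]
  · have hge : 2 ≤ (y :: w').count y := by omega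
    have hcu : PySem.Set.contains uni y = false := by
      rw [← Bool.not_eq_true, PySem.Set.contains_iff, hu y]; omega
    rw [if_neg (by rw [hcu]; exact Bool.false_ne_true)]
    have hgetD : mul.getD y 0 = (((y :: w').count y : ℕ) : Int) := by
      rw [PySem.Dict.getD_eq_get?_getD, hm y, if_pos hge]; rfl
    have hgd2 : (mul.insert y (mul.getD y 0 - 1)).getD y 0 = ((w'.count y : ℕ) : Int) := by
      rw [PySem.Dict.getD_insert_self, hgetD, hcy]; push_cast; ring
    by_cases hc1 : w'.count y = 1
    · have hcond : (mul.insert y (mul.getD y 0 - 1)).getD y 0 = 1 := by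
        rw [hgd2, hc1]; norm_num
      rw [if_pos hcond]
      refine ⟨PySem.Set.nodup_add uni y hnd, ?_, ?_⟩
      · intro v
        rw [PySem.Set.mem_add, hu v, pvCount_cons]
        by_cases hv : v = y
        · subst hv; simp [hc1]
        · simp [hv]
      · intro v
        rw [pvDict_get?_erase, PySem.Dict.get?_insert]
        by_cases hv : v = y
        · subst hv; rw [if_pos rfl, if_neg (by omega)]
        · rw [if_neg hv, if_neg hv, hm v, pvCount_cons]; simp [hv]
    · have hcond : ¬ (mul.insert y (mul.getD y 0 - 1)).getD y 0 = 1 := by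
        rw [hgd2]
        intro hh
        exact hc1 (by exact_mod_cast hh)
      rw [if_neg hcond]
      refine ⟨hnd, ?_, ?_⟩
      · intro v
        rw [hu v, pvCount_cons]
        by_cases hv : v = y
        · subst hv; simp; omega
        · simp [hv]
      · intro v
        rw [PySem.Dict.get?_insert]
        by_cases hv : v = y
        · subst hv
          rw [if_pos rfl, if_pos (by omega), hgetD, hcy]
          congr 1
          push_cast
          ring
        · rw [if_neg hv, hm v, pvCount_cons]; simp [hv]

lemma pvSet_len (s : PySem.Set Int) : PySem.Set.len s = (s.length : Int) := rfl

lemma pvRowLen (imp : List (List Int)) (n : ℕ) (hlen : imp.length = n + 1)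
    (hrows : ∀ r ∈ imp, r.length = n + 1) (a : ℕ) (ha : a ≤ n) :
    (imp.getD a []).length = n + 1 := by
  rw [List.getD_eq_getElem?_getD, List.getElem?_eq_getElem (by omega)]
  exact hrows _ (List.getElem_mem _)

lemma pvImpSet (imp : List (List Int)) (n : ℕ) (hlen : imp.length = n + 1)
    (hrows : ∀ r ∈ imp, r.length = n + 1) (a' b' : ℕ) (ha' : a' ≤ n) (hb' : b' ≤ n)
    (val : Int) (a b : ℕ) :
    pvE (imp.set a' ((imp.getD a' []).set b' val)) a b
      = if a = a' ∧ b = b' then val else pvE imp a b := by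
  unfold pvE
  rw [List.getD_eq_getElem?_getD (a := ([] : List Int))]
  by_cases haa : a = a'
  · subst haa
    rw [List.getElem?_set_self (by omega), Option.getD_some]
    rw [List.getD_eq_getElem?_getD]
    by_cases hbb : b = b'
    · subst hbb
      rw [List.getElem?_set_self (by rw [pvRowLen imp n hlen hrows a ha']; omega),
        Option.getD_some, if_pos ⟨rfl, rfl⟩]
    · rw [List.getElem?_set_ne (fun h => hbb h.symm), if_neg (by tauto),
        ← List.getD_eq_getElem?_getD]
  · rw [List.getElem?_set_ne (fun h => haa h.symm), if_neg (by tauto),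
      ← List.getD_eq_getElem?_getD (a := ([] : List Int))]

lemma pvStepA_inv (nums : List Int) (k : Int) (l : ℕ) (hl : 1 ≤ l)
    (imp0 : List (List Int)) (i : ℕ) (hi : i < nums.length)
    (st : PySem.Set Int × PySem.Dict Int Int × List (List Int))
    (h : pvInvA nums k l imp0 i st) :
    pvInvA nums k l imp0 (i + 1) (stepAInner nums k (l : Int) st (i : Int)) := by
  obtain ⟨hnd, hu, hm, hlen, hrows, hent⟩ := h
  have hxv : PySem.List.pyGetD nums (i : Int) 0 = nums[i]'hi := by
    rw [PySem.List.pyGetD_natCast, List.getD_eq_getElem?_getD, List.getElem?_eq_getElem hi]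
    rfl
  have hmid : pvWin nums (i - l) (i + 1) = pvWin nums (i - l) i ++ [nums[i]'hi] :=
    pvWin_succ_right nums (by omega) hi
  unfold stepAInner
  dsimp only
  rw [hxv]
  have H1 := pvAddElem st.1 st.2.1 (nums[i]'hi) (pvWin nums (i - l) i) hnd hu hm
  rw [← hmid] at H1
  obtain ⟨h1n, h1u, h1m⟩ := H1
  by_cases hli : (l : Int) ≤ (i : Int)
  · -- the window also loses its leftmost element nums[i-l]
    have hlin : l ≤ i := by exact_mod_cast hli
    have hyv : PySem.List.pyGetD nums ((i : Int) - (l : Int)) 0 = nums[i - l]'(by omega) := by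
      rw [show (i : Int) - (l : Int) = ((i - l : ℕ) : Int) by push_cast [Nat.cast_sub hlin]; ring,
        PySem.List.pyGetD_natCast, List.getD_eq_getElem?_getD,
        List.getElem?_eq_getElem (by omega)]
      rfl
    have hcons : pvWin nums (i - l) (i + 1)
        = nums[i - l]'(by omega) :: pvWin nums (i - l + 1) (i + 1) :=
      pvWin_cons nums (by omega) (by omega)
    rw [hcons] at h1u h1m
    rw [if_pos hli, hyv]
    have H2 := pvDropHead _ _ _ _ h1n h1u h1m
    dsimp only at H2
    obtain ⟨h2n, h2u, h2m⟩ := H2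
    have hwin1 : i + 1 - l = i - l + 1 := by omega
    refine ⟨h2n, ?_, ?_, ?_, ?_, ?_⟩
    · intro v; rw [hwin1]; exact h2u v
    · intro v; rw [hwin1]; exact h2m v
    · -- imp length
      rw [if_pos (by omega : (l : Int) - 1 ≤ (i : Int))]
      rw [PySem.List.pySetD_of_nonneg _ _ (by omega)]
      rw [List.length_set]
      exact hlen
    · -- row lengths
      rw [if_pos (by omega : (l : Int) - 1 ≤ (i : Int))]
      intro r hr
      rw [PySem.List.pySetD_of_nonneg _ _ (by omega)] at hr
      rcases List.mem_or_eq_of_mem_set hr with hr' | hr'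
      · exact hrows r hr'
      · subst hr'
        have hcastA : (i : Int) - (l : Int) + 1 = ((i + 1 - l : ℕ) : Int) := by
          push_cast [Nat.cast_sub (by omega : l ≤ i + 1)]; ring
        rw [PySem.List.pySetD_of_nonneg _ _ (by omega), List.length_set, hcastA,
          PySem.List.pyGetD_natCast]
        exact pvRowLen st.2.2 nums.length hlen hrows _ (by omega)
    · -- importance entries
      rw [if_pos (by omega : (l : Int) - 1 ≤ (i : Int))]
      have hcastA : (i : Int) - (l : Int) + 1 = ((i + 1 - l : ℕ) : Int) := by
        push_cast [Nat.cast_sub (by omega : l ≤ i + 1)]; ring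
      have hcastB : (i : Int) + 1 = ((i + 1 : ℕ) : Int) := by push_cast; ring
      rw [hcastA, hcastB, PySem.List.pyGetD_natCast, PySem.List.pySetD_natCast,
        PySem.List.pySetD_natCast, pvSet_len, pvOnce_eq_len h2n h2u]
      intro a b ha hb
      rw [pvImpSet st.2.2 nums.length hlen hrows _ _ (by omega) (by omega) _ a b]
      by_cases hnew : a = i + 1 - l ∧ b = i + 1
      · obtain ⟨haa, hbb⟩ := hnew
        subst haa; subst hbb
        rw [if_pos ⟨rfl, rfl⟩, if_pos (by omega), pvCost, ← hwin1]
        push_cast [Nat.cast_sub (by omega : l ≤ i + 1)]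
        ring
      · rw [if_neg hnew, hent a b ha hb,
          if_congr (by omega : (b = a + l ∧ b ≤ i) ↔ (b = a + l ∧ b ≤ i + 1)) rfl rfl]
  · have hlin : ¬ l ≤ i := by exact_mod_cast hli
    rw [if_neg hli]
    have hwin0 : i + 1 - l = i - l := by omega
    refine ⟨h1n, ?_, ?_, ?_, ?_, ?_⟩
    · intro v; rw [hwin0]; exact h1u v
    · intro v; rw [hwin0]; exact h1m v
    · by_cases hli1 : (l : Int) - 1 ≤ (i : Int)
      · rw [if_pos hli1, PySem.List.pySetD_of_nonneg _ _ (by omega), List.length_set]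
        exact hlen
      · rw [if_neg hli1]; exact hlen
    · by_cases hli1 : (l : Int) - 1 ≤ (i : Int)
      · rw [if_pos hli1]
        intro r hr
        rw [PySem.List.pySetD_of_nonneg _ _ (by omega)] at hr
        rcases List.mem_or_eq_of_mem_set hr with hr' | hr'
        · exact hrows r hr'
        · subst hr'
          have hcastA : (i : Int) - (l : Int) + 1 = ((i + 1 - l : ℕ) : Int) := by
            push_cast [Nat.cast_sub (by omega : l ≤ i + 1)]; ring
          rw [PySem.List.pySetD_of_nonneg _ _ (by omega), List.length_set, hcastA,
            PySem.List.pyGetD_natCast]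
          exact pvRowLen st.2.2 nums.length hlen hrows _ (by omega)
      · rw [if_neg hli1]; exact hrows
    · by_cases hli1 : (l : Int) - 1 ≤ (i : Int)
      · rw [if_pos hli1]
        have hcastA : (i : Int) - (l : Int) + 1 = ((i + 1 - l : ℕ) : Int) := by
          push_cast [Nat.cast_sub (by omega : l ≤ i + 1)]; ring
        have hcastB : (i : Int) + 1 = ((i + 1 : ℕ) : Int) := by push_cast; ring
        have h1u' : ∀ v, v ∈ (if PySem.Set.contains st.1 (nums[i]'hi) then
              (PySem.Set.discard st.1 (nums[i]'hi), st.2.1.insert (nums[i]'hi) 2)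
            else if !(st.2.1.contains (nums[i]'hi)) then (PySem.Set.add st.1 (nums[i]'hi), st.2.1)
            else (st.1, st.2.1.insert (nums[i]'hi) (st.2.1.getD (nums[i]'hi) 0 + 1))).1
            ↔ (pvWin nums (i + 1 - l) (i + 1)).count v = 1 := by
          intro v; rw [hwin0]; exact h1u v
        rw [hcastA, hcastB, PySem.List.pyGetD_natCast, PySem.List.pySetD_natCast,
          PySem.List.pySetD_natCast, pvSet_len, pvOnce_eq_len h1n h1u']
        intro a b ha hb
        rw [pvImpSet st.2.2 nums.length hlen hrows _ _ (by omega) (by omega) _ a b]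
        by_cases hnew : a = i + 1 - l ∧ b = i + 1
        · obtain ⟨haa, hbb⟩ := hnew
          subst haa; subst hbb
          rw [if_pos ⟨rfl, rfl⟩, if_pos (by omega), pvCost]
          push_cast [Nat.cast_sub (by omega : l ≤ i + 1)]
          ring
        · rw [if_neg hnew, hent a b ha hb,
            if_congr (by omega : (b = a + l ∧ b ≤ i) ↔ (b = a + l ∧ b ≤ i + 1)) rfl rfl]
      · rw [if_neg hli1]
        intro a b ha hb
        rw [hent a b ha hb,
          if_congr (by omega : (b = a + l ∧ b ≤ i) ↔ (b = a + l ∧ b ≤ i + 1)) rfl rfl]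

lemma pvLoopA (nums : List Int) (k : Int) (l : ℕ) (hl : 1 ≤ l) (imp0 : List (List Int)) :
    ∀ (m i0 : ℕ), i0 + m = nums.length → ∀ st, pvInvA nums k l imp0 i0 st →
      pvInvA nums k l imp0 nums.length
        ((PySem.List.pyRange (i0 : Int) ((nums.length : Int)) 1).foldl
          (stepAInner nums k (l : Int)) st) := by
  intro m
  induction m with
  | zero =>
    intro i0 h0 st h
    have hi0 : i0 = nums.length := by omega
    subst hi0
    rw [PySem.List.pyRange_one_eq_nil (by omega)]
    exact h
  | succ m ih =>
    intro i0 h0 st h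
    rw [PySem.List.pyRange_one_cons (by omega), List.foldl_cons,
      show (i0 : Int) + 1 = ((i0 + 1 : ℕ) : Int) by push_cast; ring]
    exact ih (i0 + 1) (by omega) _ (pvStepA_inv nums k l hl imp0 i0 (by omega) st h)

lemma pvInitA (nums : List Int) (k : Int) (l : ℕ) (hl : 1 ≤ l) (imp0 : List (List Int))
    (h1 : imp0.length = nums.length + 1) (h2 : ∀ r ∈ imp0, r.length = nums.length + 1) :
    pvInvA nums k l imp0 0 (PySem.Set.empty, PySem.Dict.empty, imp0) := by
  refine ⟨List.nodup_nil, ?_, ?_, h1, h2, ?_⟩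
  · intro v; rw [pvWin_zero]; simp [PySem.Set.empty]
  · intro v; rw [pvWin_zero]; simp [PySem.Dict.get?_empty]
  · intro a b ha hb; rw [if_neg (by omega)]

lemma pvPassA (nums : List Int) (k : Int) (l : ℕ) (hl : 1 ≤ l) (imp0 : List (List Int))
    (h1 : imp0.length = nums.length + 1) (h2 : ∀ r ∈ imp0, r.length = nums.length + 1) :
    (((PySem.List.pyRange 0 (nums.length : Int) 1).foldl
        (stepAInner nums k (l : Int)) (PySem.Set.empty, PySem.Dict.empty, imp0)).2.2).length
        = nums.length + 1
    ∧ (∀ r ∈ ((PySem.List.pyRange 0 (nums.length : Int) 1).foldl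
        (stepAInner nums k (l : Int)) (PySem.Set.empty, PySem.Dict.empty, imp0)).2.2,
        r.length = nums.length + 1)
    ∧ (∀ a b : ℕ, a ≤ nums.length → b ≤ nums.length →
        pvE (((PySem.List.pyRange 0 (nums.length : Int) 1).foldl
          (stepAInner nums k (l : Int)) (PySem.Set.empty, PySem.Dict.empty, imp0)).2.2) a b
          = if b = a + l ∧ b ≤ nums.length then pvCost nums k a b else pvE imp0 a b) := by
  have H := pvLoopA nums k l hl imp0 nums.length 0 (by omega) _
    (pvInitA nums k l hl imp0 h1 h2)
  rw [Nat.cast_zero] at H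
  exact ⟨H.2.2.2.1, H.2.2.2.2.1, H.2.2.2.2.2⟩

lemma pvE_init (nums : List Int) (a b : ℕ) :
    pvE ((List.range (nums.length + 1)).map (fun _ => List.replicate (nums.length + 1) (0 : Int))) a b = 0 := by
  unfold pvE
  rcases Nat.lt_or_ge a (nums.length + 1) with ha | ha
  · rw [List.getD_eq_getElem?_getD (a := ([] : List Int)), List.getElem?_map,
      List.getElem?_range ha]
    simp [List.getD_eq_getElem?_getD, List.getElem?_replicate]
    split_ifs <;> rfl
  · rw [List.getD_eq_getElem?_getD (a := ([] : List Int)),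
      List.getElem?_eq_none (by simpa using ha)]
    rfl

lemma pvTableA (nums : List Int) (k : Int) :
    ∀ L : ℕ, L ≤ nums.length →
      (((PySem.List.pyRange 1 ((L : Int) + 1) 1).foldl
          (fun imp l =>
            ((PySem.List.pyRange 0 (nums.length : Int) 1).foldl (stepAInner nums k l)
              (PySem.Set.empty, PySem.Dict.empty, imp)).2.2)
          ((List.range (nums.length + 1)).map (fun _ => List.replicate (nums.length + 1) (0 : Int)))).length
          = nums.length + 1)
      ∧ (∀ r ∈ (PySem.List.pyRange 1 ((L : Int) + 1) 1).foldl
          (fun imp l =>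
            ((PySem.List.pyRange 0 (nums.length : Int) 1).foldl (stepAInner nums k l)
              (PySem.Set.empty, PySem.Dict.empty, imp)).2.2)
          ((List.range (nums.length + 1)).map (fun _ => List.replicate (nums.length + 1) (0 : Int))),
          r.length = nums.length + 1)
      ∧ (∀ a b : ℕ, a ≤ nums.length → b ≤ nums.length →
        pvE ((PySem.List.pyRange 1 ((L : Int) + 1) 1).foldl
          (fun imp l =>
            ((PySem.List.pyRange 0 (nums.length : Int) 1).foldl (stepAInner nums k l)
              (PySem.Set.empty, PySem.Dict.empty, imp)).2.2)
          ((List.range (nums.length + 1)).map (fun _ => List.replicate (nums.length + 1) (0 : Int)))) a b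
        = if a < b ∧ b ≤ a + L then pvCost nums k a b else 0) := by
  intro L
  induction L with
  | zero =>
    intro _
    rw [show ((0 : ℕ) : Int) + 1 = 1 by norm_num,
      PySem.List.pyRange_one_eq_nil (a := 1) (b := 1) le_rfl, List.foldl_nil]
    refine ⟨by simp, by simp, ?_⟩
    intro a b ha hb
    rw [if_neg (by omega), pvE_init]
  | succ L ih =>
    intro hL
    obtain ⟨ihl, ihr, ihe⟩ := ih (by omega)
    rw [show ((L + 1 : ℕ) : Int) + 1 = ((L : Int) + 1) + 1 by push_cast; ring,
      PySem.List.pyRange_one_succ_right (by omega), List.foldl_append, List.foldl_cons,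
      List.foldl_nil]
    have HP := pvPassA nums k (L + 1) (by omega) _ ihl ihr
    rw [show ((L + 1 : ℕ) : Int) = (L : Int) + 1 by push_cast; ring] at HP
    refine ⟨HP.1, HP.2.1, ?_⟩
    intro a b ha hb
    rw [HP.2.2 a b ha hb]
    by_cases hnew : b = a + (L + 1) ∧ b ≤ nums.length
    · rw [if_pos hnew, if_pos (by omega)]
    · rw [if_neg hnew, ihe a b ha hb,
        if_congr (by omega : (a < b ∧ b ≤ a + L) ↔ (a < b ∧ b ≤ a + (L + 1))) rfl rfl]

lemma pvDpl_last (nums : List Int) (k : Int) (m : ℕ) :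
    (pvDpl nums k (m + 1)).getD (m + 1) 0
      = pvBM (pvC nums k (pvDpl nums k m) (m + 1)) (m + 1) 0 := by
  rw [show pvDpl nums k (m + 1) = pvDpl nums k m ++ [_] from rfl,
    List.getD_eq_getElem?_getD, List.getElem?_append_right (by rw [pvDpl_length]),
    pvDpl_length]
  simp

lemma pvA_dp (nums : List Int) (k : Int) (imp : List (List Int))
    (hE : ∀ a b : ℕ, a < b → b ≤ nums.length → pvE imp a b = pvCost nums k a b) :
    ∀ m : ℕ, m ≤ nums.length →
      (((PySem.List.pyRange 1 ((m : Int) + 1) 1).foldl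
        (fun dp i =>
          (PySem.List.pyRange 0 i 1).foldl
            (fun dp j =>
              PySem.List.pySetD dp i
                (pvOMin (PySem.List.pyGetD dp i none)
                  (pvOAdd (PySem.List.pyGetD dp j none)
                    (PySem.List.pyGetD (PySem.List.pyGetD imp j []) i 0))))
            dp)
        (PySem.List.pySetD (List.replicate (nums.length + 1) (none : Option Int)) 0 (some 0))).length
        = nums.length + 1)
      ∧ (∀ j : ℕ, j ≤ nums.length →
      (((PySem.List.pyRange 1 ((m : Int) + 1) 1).foldl
        (fun dp i =>
          (PySem.List.pyRange 0 i 1).foldl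
            (fun dp j =>
              PySem.List.pySetD dp i
                (pvOMin (PySem.List.pyGetD dp i none)
                  (pvOAdd (PySem.List.pyGetD dp j none)
                    (PySem.List.pyGetD (PySem.List.pyGetD imp j []) i 0))))
            dp)
        (PySem.List.pySetD (List.replicate (nums.length + 1) (none : Option Int)) 0 (some 0))).getD j none)
      = if j ≤ m then some ((pvDpl nums k m).getD j 0) else none) := by
  intro m
  induction m with
  | zero =>
    intro _
    rw [show ((0 : ℕ) : Int) + 1 = 1 by norm_num, PySem.List.pyRange_one_eq_nil (by norm_num),
      List.foldl_nil, PySem.List.pySetD_of_nonneg _ _ (by norm_num), Int.toNat_zero]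
    constructor
    · rw [List.length_set, List.length_replicate]
    · intro j hj
      rcases Nat.eq_zero_or_pos j with hj0 | hj0
      · subst hj0
        rw [List.getD_eq_getElem?_getD,
          List.getElem?_set_self (by rw [List.length_replicate]; omega), if_pos le_rfl]
        rfl
      · rw [List.getD_eq_getElem?_getD, List.getElem?_set_ne (by omega),
          List.getElem?_replicate_of_lt (by omega), if_neg (by omega)]
        rfl
  | succ m ih =>
    intro hm1
    obtain ⟨ihlen, ihval⟩ := ih (by omega)
    rw [show ((m + 1 : ℕ) : Int) + 1 = ((m : Int) + 1) + 1 by push_cast; ring,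
      PySem.List.pyRange_one_succ_right (by omega), List.foldl_append, List.foldl_cons,
      List.foldl_nil]
    -- name the dp list entering outer step m+1
    set dpPrev := ((PySem.List.pyRange 1 ((m : Int) + 1) 1).foldl
        (fun dp i =>
          (PySem.List.pyRange 0 i 1).foldl
            (fun dp j =>
              PySem.List.pySetD dp i
                (pvOMin (PySem.List.pyGetD dp i none)
                  (pvOAdd (PySem.List.pyGetD dp j none)
                    (PySem.List.pyGetD (PySem.List.pyGetD imp j []) i 0))))
            dp)
        (PySem.List.pySetD (List.replicate (nums.length + 1) (none : Option Int)) 0 (some 0)))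
      with hdpPrev
    have hc : ∀ t : ℕ, t ≤ m + 1 →
        (((PySem.List.pyRange 0 ((t : ℕ) : Int) 1).foldl
          (fun dp j =>
              PySem.List.pySetD dp ((m : Int) + 1)
                (pvOMin (PySem.List.pyGetD dp ((m : Int) + 1) none)
                  (pvOAdd (PySem.List.pyGetD dp j none)
                    (PySem.List.pyGetD (PySem.List.pyGetD imp j []) ((m : Int) + 1) 0))))
          dpPrev).length = nums.length + 1)
        ∧ (∀ j : ℕ, j ≤ nums.length →
          (((PySem.List.pyRange 0 ((t : ℕ) : Int) 1).foldl
          (fun dp j =>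
              PySem.List.pySetD dp ((m : Int) + 1)
                (pvOMin (PySem.List.pyGetD dp ((m : Int) + 1) none)
                  (pvOAdd (PySem.List.pyGetD dp j none)
                    (PySem.List.pyGetD (PySem.List.pyGetD imp j []) ((m : Int) + 1) 0))))
          dpPrev).getD j none)
          = if j = m + 1 then pvAM (pvC nums k (pvDpl nums k m) (m + 1)) t
            else dpPrev.getD j none) := by
      intro t
      induction t with
      | zero =>
        intro _
        rw [show ((0 : ℕ) : Int) = 0 by norm_num, PySem.List.pyRange_one_eq_nil le_rfl,
          List.foldl_nil]
        refine ⟨ihlen, ?_⟩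
        intro j hj
        by_cases hji : j = m + 1
        · rw [if_pos hji, hji, ihval (m + 1) (by omega), if_neg (by omega)]
          rfl
        · rw [if_neg hji]
      | succ t iht =>
        intro ht1
        obtain ⟨ihtl, ihtv⟩ := iht (by omega)
        rw [show ((t + 1 : ℕ) : Int) = ((t : ℕ) : Int) + 1 by push_cast; ring,
          PySem.List.pyRange_one_succ_right (by positivity), List.foldl_append,
          List.foldl_cons, List.foldl_nil]
        set S := (PySem.List.pyRange 0 ((t : ℕ) : Int) 1).foldl
          (fun dp j =>
              PySem.List.pySetD dp ((m : Int) + 1)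
                (pvOMin (PySem.List.pyGetD dp ((m : Int) + 1) none)
                  (pvOAdd (PySem.List.pyGetD dp j none)
                    (PySem.List.pyGetD (PySem.List.pyGetD imp j []) ((m : Int) + 1) 0))))
          dpPrev with hS
        have hgi : PySem.List.pyGetD S ((m : Int) + 1) none
            = pvAM (pvC nums k (pvDpl nums k m) (m + 1)) t := by
          rw [show ((m : Int) + 1) = ((m + 1 : ℕ) : Int) by push_cast; ring,
            PySem.List.pyGetD_natCast, ihtv (m + 1) (by omega), if_pos rfl]
        have hgt : PySem.List.pyGetD S ((t : ℕ) : Int) none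
            = some ((pvDpl nums k m).getD t 0) := by
          rw [PySem.List.pyGetD_natCast, ihtv t (by omega), if_neg (by omega),
            ihval t (by omega), if_pos (by omega)]
        have hge : PySem.List.pyGetD (PySem.List.pyGetD imp ((t : ℕ) : Int) []) ((m : Int) + 1) 0
            = pvCost nums k t (m + 1) := by
          rw [show ((m : Int) + 1) = ((m + 1 : ℕ) : Int) by push_cast; ring,
            PySem.List.pyGetD_natCast, PySem.List.pyGetD_natCast]
          exact hE t (m + 1) (by omega) (by omega)
        rw [hgi, hgt, hge]
        have hstep : pvOMin (pvAM (pvC nums k (pvDpl nums k m) (m + 1)) t)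
              (pvOAdd (some ((pvDpl nums k m).getD t 0)) (pvCost nums k t (m + 1)))
            = pvAM (pvC nums k (pvDpl nums k m) (m + 1)) (t + 1) := by
          rw [show pvAM (pvC nums k (pvDpl nums k m) (m + 1)) (t + 1)
              = pvOMin (pvAM (pvC nums k (pvDpl nums k m) (m + 1)) t)
                (some (pvC nums k (pvDpl nums k m) (m + 1) t)) from rfl]
          rfl
        rw [hstep, show ((m : Int) + 1) = ((m + 1 : ℕ) : Int) by push_cast; ring,
          PySem.List.pySetD_natCast]
        constructor
        · rw [List.length_set]; exact ihtl
        · intro j hj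
          by_cases hji : j = m + 1
          · subst hji
            rw [List.getD_eq_getElem?_getD, List.getElem?_set_self (by omega),
              Option.getD_some, if_pos rfl]
          · rw [List.getD_eq_getElem?_getD, List.getElem?_set_ne (fun hh => hji hh.symm),
              ← List.getD_eq_getElem?_getD, ihtv j hj, if_neg hji, if_neg hji]
    obtain ⟨hflen, hfval⟩ := hc (m + 1) le_rfl
    rw [show ((m : Int) + 1) = ((m + 1 : ℕ) : Int) by push_cast; ring] at hflen hfval ⊢
    refine ⟨hflen, ?_⟩
    intro j hj
    rw [hfval j hj]
    by_cases hji : j = m + 1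
    · rw [if_pos hji, hji, if_pos le_rfl, pvAM_eq_MM, pvDpl_last,
        pvBM_eq_MM _ m 0 (m + 1) (by omega)]
    · rw [if_neg hji, ihval j hj]
      by_cases hjm : j ≤ m
      · rw [if_pos hjm, if_pos (by omega),
          show (pvDpl nums k (m + 1)).getD j 0 = (pvDpl nums k m).getD j 0 from
            pvDpl_getD_stable nums k hjm (Nat.le_succ m)]
      · rw [if_neg hjm, if_neg (by omega)]

-- ===== VERDICT (by name: the statement is the Claim_ definition above) =====
theorem minCost2_spec : Claim_equal_minCost2 := by
  unfold Claim_equal_minCost2 Spec_minCost2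
  intro nums k _
  rw [pvB_value]
  unfold minCost2
  dsimp only
  have hT := pvTableA nums k nums.length le_rfl
  have hE : ∀ a b : ℕ, a < b → b ≤ nums.length →
      pvE ((PySem.List.pyRange 1 ((nums.length : Int) + 1) 1).foldl
        (fun imp l =>
          ((PySem.List.pyRange 0 (nums.length : Int) 1).foldl (stepAInner nums k l)
            (PySem.Set.empty, PySem.Dict.empty, imp)).2.2)
        ((List.range (nums.length + 1)).map (fun _ => List.replicate (nums.length + 1) (0 : Int)))) a b
      = pvCost nums k a b := by
    intro a b h1 h2
    rw [hT.2.2 a b (by omega) h2, if_pos (by omega)]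
  have hD := (pvA_dp nums k _ hE nums.length le_rfl).2 nums.length le_rfl
  rw [PySem.List.pyGetD_natCast, hD, if_pos le_rfl]
  rfl
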